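-- pv_equiv track=rewrite | github.com/Schromeo/CodingStepByStep | OAPrepare/CS/memory_alloc.py | solution
-- ===== SOURCE A (Python) =====
-- def solution(matrix):
--     # 1. 获取维度
--     # rows = 行数 (n), cols = 列数 (m)
--     rows, cols = len(matrix), len(matrix[0])
--
--     # 2. 初始化 DP 矩阵
--     # 矩阵应该是 rows x cols (即 n x m)
--     left_up = [[0] * cols for _ in range(rows)]
--     right_up = [[0] * cols for _ in range(rows)]
--     left_down = [[0] * cols for _ in range(rows)]
--     right_down = [[0] * cols for _ in range(rows)]
--
--     # --- 阶段 1: 从上到下, 计算 left_up 和 right_up ---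
--     for i in range(rows):  # i 是行索引
--         for j in range(cols):  # j 是列索引
--             if matrix[i][j] == 1:
--                 # 【已修复】给 [i][j] 单元格赋值, 而不是覆盖整个变量
--                 # 【已修复】right_up 应该看 [i-1][j+1]
--                 left_up[i][j] = (left_up[i-1][j-1] + 1) if i > 0 and j > 0 else 1
--                 right_up[i][j] = (right_up[i-1][j+1] + 1) if i > 0 and j < cols - 1 else 1
--
--     # --- 阶段 2: 从下到上, 计算 left_down 和 right_down ---
--     for i in range(rows - 1, -1, -1): # i 是行索引
--         for j in range(cols - 1, -1, -1): # j 是列索引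
--             if matrix[i][j] == 1:
--                 # 【已修复】给 [i][j] 单元格赋值
--                 # 【已修复】修正 DP 方向
--                 left_down[i][j] = (left_down[i+1][j-1] + 1) if i < rows - 1 and j > 0 else 1
--                 right_down[i][j] = (right_down[i+1][j+1] + 1) if i < rows - 1 and j < cols - 1 else 1
--
--     # --- 阶段 3: 寻找最大值和最小索引 ---
--     max_size = 0
--     res = [0, 0]
--     for i in range(rows): # i 是行
--         for j in range(cols): # j 是列
--             # 'x' 的大小是四条射线中最小的那条
--             size = min(left_up[i][j], right_up[i][j], left_down[i][j], right_down[i][j])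
--
--             if size > max_size:
--                 max_size = size
--                 res = [i, j]
--             elif size == max_size:
--                 # 平局规则: 最小的 i (row), 然后是 最小的 j (col)
--                 if i < res[0] or (i == res[0] and j < res[1]):
--                     res = [i, j]
--
--     return res
-- ===== SOURCE B (Python) =====
-- def solution(matrix):
--     rows, cols = len(matrix), len(matrix[0])
--
--     # count consecutive 1s from (i, j) walking in direction (di, dj), cell included
--     def arm(i, j, di, dj):
--         c = 0
--         while 0 <= i < rows and 0 <= j < cols and matrix[i][j] == 1:
--             c += 1
--             i += di
--             j += dj
--         return c
--
--     max_size = 0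
--     res = [0, 0]
--     for i in range(rows):
--         for j in range(cols):
--             size = min(arm(i, j, -1, -1), arm(i, j, -1, 1),
--                        arm(i, j, 1, -1), arm(i, j, 1, 1))
--             if size > max_size:
--                 max_size = size
--                 res = [i, j]
--             elif size == max_size:
--                 if i < res[0] or (i == res[0] and j < res[1]):
--                     res = [i, j]
--     return res
-- ===== Notes on version B (the rewrite author's own statement) =====
-- stated objective: alternative
-- what changed: Replaced A's four precomputed DP tables (two extra sweeps over the matrix plus O(rows*cols) auxiliary storage) by direct on-the-fly diagonal arm walks from each cell inside the single selection scan.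
import Mathlib
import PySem

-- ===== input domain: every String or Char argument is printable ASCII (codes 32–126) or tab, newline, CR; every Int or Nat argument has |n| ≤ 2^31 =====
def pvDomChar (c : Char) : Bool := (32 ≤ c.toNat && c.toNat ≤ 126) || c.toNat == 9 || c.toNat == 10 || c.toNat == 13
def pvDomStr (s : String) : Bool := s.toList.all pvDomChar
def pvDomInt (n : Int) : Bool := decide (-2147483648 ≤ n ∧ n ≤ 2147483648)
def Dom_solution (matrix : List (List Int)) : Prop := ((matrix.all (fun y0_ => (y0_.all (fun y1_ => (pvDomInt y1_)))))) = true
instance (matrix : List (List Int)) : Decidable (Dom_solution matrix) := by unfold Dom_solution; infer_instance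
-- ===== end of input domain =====

-- B replaces A's four DP tables by direct diagonal arm walks from each cell (alternative algorithm, no speed claim).

-- ===== PORT A =====
-- 2D-list read/write helpers: matrix[i][j] and matrix[i][j]=v. All indices produced by
-- the loops are in range under Pre_solution, so the getD default is never read there.
def g2 (t : List (List Int)) (i j : Nat) : Int := (t.getD i []).getD j 0
def s2 (t : List (List Int)) (i j : Nat) (v : Int) : List (List Int) :=
  t.set i ((t.getD i []).set j v)
-- [[0] * cols for _ in range(rows)]
def mk0 (rows cols : Nat) : List (List Int) := List.replicate rows (List.replicate cols 0)

-- phase 1 body for cell (i, j): updates (left_up, right_up)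
def p1step (matrix : List (List Int)) (cols i : Nat)
    (st : List (List Int) × List (List Int)) (j : Nat) :
    List (List Int) × List (List Int) :=
  if g2 matrix i j = 1 then
    (s2 st.1 i j (if 0 < i ∧ 0 < j then g2 st.1 (i - 1) (j - 1) + 1 else 1),
     s2 st.2 i j (if 0 < i ∧ j < cols - 1 then g2 st.2 (i - 1) (j + 1) + 1 else 1))
  else st

def p1row (matrix : List (List Int)) (cols : Nat)
    (st : List (List Int) × List (List Int)) (i : Nat) :
    List (List Int) × List (List Int) :=
  (List.range cols).foldl (p1step matrix cols i) st

-- phase 2 body for cell (i, j): updates (left_down, right_down)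
def p2step (matrix : List (List Int)) (rows cols i : Nat)
    (st : List (List Int) × List (List Int)) (j : Nat) :
    List (List Int) × List (List Int) :=
  if g2 matrix i j = 1 then
    (s2 st.1 i j (if i < rows - 1 ∧ 0 < j then g2 st.1 (i + 1) (j - 1) + 1 else 1),
     s2 st.2 i j (if i < rows - 1 ∧ j < cols - 1 then g2 st.2 (i + 1) (j + 1) + 1 else 1))
  else st

def p2row (matrix : List (List Int)) (rows cols : Nat)
    (st : List (List Int) × List (List Int)) (i : Nat) :
    List (List Int) × List (List Int) :=
  ((List.range cols).reverse).foldl (p2step matrix rows cols i) st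

-- phase 3 body: state is (max_size, res)
def selAstep (lu ru ld rd : List (List Int)) (i : Nat)
    (st : Int × List Int) (j : Nat) : Int × List Int :=
  let size := min (min (min (g2 lu i j) (g2 ru i j)) (g2 ld i j)) (g2 rd i j)
  if size > st.1 then (size, [(i : Int), (j : Int)])
  else if size = st.1 then
    (if (i : Int) < st.2.getD 0 0 ∨ ((i : Int) = st.2.getD 0 0 ∧ (j : Int) < st.2.getD 1 0)
     then (st.1, [(i : Int), (j : Int)]) else st)
  else st

def solution (matrix : List (List Int)) : List Int :=
  let rows := matrix.length
  let cols := (matrix.getD 0 []).length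
  let p1 := (List.range rows).foldl (p1row matrix cols) (mk0 rows cols, mk0 rows cols)
  let p2 := ((List.range rows).reverse).foldl (p2row matrix rows cols) (mk0 rows cols, mk0 rows cols)
  ((List.range rows).foldl
      (fun st i => (List.range cols).foldl (selAstep p1.1 p1.2 p2.1 p2.2 i) st)
      ((0 : Int), [0, 0])).2

-- ===== PORT B =====
-- Source B's single while-loop helper 'arm' is ported as its four (±1, ±1) instantiations, one
-- recursive function per direction; each recursion step is one loop iteration, and the
-- Python bounds checks 0 <= i < rows / 0 <= j < cols become the Nat guards here.
def armUL (matrix : List (List Int)) : Nat → Nat → Int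
  | i, j =>
    if g2 matrix i j = 1 then
      if h : 0 < i ∧ 0 < j then armUL matrix (i - 1) (j - 1) + 1 else 1
    else 0
  termination_by i _ => i
  decreasing_by omega

def armUR (matrix : List (List Int)) (cols : Nat) : Nat → Nat → Int
  | i, j =>
    if g2 matrix i j = 1 then
      if h : 0 < i ∧ j + 1 < cols then armUR matrix cols (i - 1) (j + 1) + 1 else 1
    else 0
  termination_by i _ => i
  decreasing_by omega

def armDL (matrix : List (List Int)) (rows : Nat) : Nat → Nat → Int
  | i, j =>
    if g2 matrix i j = 1 then
      if h : i + 1 < rows ∧ 0 < j then armDL matrix rows (i + 1) (j - 1) + 1 else 1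
    else 0
  termination_by i _ => rows - i
  decreasing_by omega

def armDR (matrix : List (List Int)) (rows cols : Nat) : Nat → Nat → Int
  | i, j =>
    if g2 matrix i j = 1 then
      if h : i + 1 < rows ∧ j + 1 < cols then armDR matrix rows cols (i + 1) (j + 1) + 1 else 1
    else 0
  termination_by i _ => rows - i
  decreasing_by omega

def selBstep (matrix : List (List Int)) (rows cols i : Nat)
    (st : Int × List Int) (j : Nat) : Int × List Int :=
  let size := min (min (min (armUL matrix i j) (armUR matrix cols i j))
                       (armDL matrix rows i j)) (armDR matrix rows cols i j)
  if size > st.1 then (size, [(i : Int), (j : Int)])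
  else if size = st.1 then
    (if (i : Int) < st.2.getD 0 0 ∨ ((i : Int) = st.2.getD 0 0 ∧ (j : Int) < st.2.getD 1 0)
     then (st.1, [(i : Int), (j : Int)]) else st)
  else st

def solution_alt (matrix : List (List Int)) : List Int :=
  let rows := matrix.length
  let cols := (matrix.getD 0 []).length
  ((List.range rows).foldl
      (fun st i => (List.range cols).foldl (selBstep matrix rows cols i) st)
      ((0 : Int), [0, 0])).2

-- ===== PRECONDITION & SPEC =====
-- Pre_ excludes exactly the inputs on which the Python A raises IndexError: the empty
-- matrix (matrix[0]) and matrices with a row shorter than the first row (matrix[i][j]).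
def Pre_solution (matrix : List (List Int)) : Prop :=
  matrix ≠ [] ∧ ∀ r ∈ matrix, (matrix.headD []).length ≤ r.length
instance (matrix : List (List Int)) : Decidable (Pre_solution matrix) := by
  unfold Pre_solution; infer_instance

def pvWitness_solution : List (List Int) := [[1, 0, 1], [0, 1, 0], [1, 0, 1]]

def Spec_solution (matrix : List (List Int)) (out : List Int) : Prop := out = solution_alt matrix
instance (matrix : List (List Int)) (out : List Int) : Decidable (Spec_solution matrix out) := by
  unfold Spec_solution; infer_instance

-- ===== CLAIM (what is proved, stated in full; the proofs are below) =====
def Claim_equal_solution : Prop :=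
  ∀ (matrix : List (List Int)), Dom_solution matrix → Pre_solution matrix →
    Spec_solution matrix (solution matrix)

-- ===== LEMMAS AND PROOFS =====

-- generic fold-invariant / congruence lemmas over List.range
lemma foldl_range_inv {α : Type} (f : α → Nat → α) (P : α → Nat → Prop) :
    ∀ (n : Nat) (st : α), (∀ st k, k < n → P st k → P (f st k) (k + 1)) → P st 0 →
      P (List.foldl f st (List.range n)) n := by
  intro n
  induction n with
  | zero => intro st _ h0; simpa using h0
  | succ n ih =>
    intro st h h0
    rw [List.range_succ, List.foldl_append]
    exact h _ n (Nat.lt_succ_self n)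
      (ih st (fun st k hk => h st k (hk.trans (Nat.lt_succ_self n))) h0)

lemma foldl_rrange_inv {α : Type} (f : α → Nat → α) (P : α → Nat → Prop) :
    ∀ (n : Nat) (st : α), (∀ st k, k < n → P st (k + 1) → P (f st k) k) → P st n →
      P (List.foldl f st (List.range n).reverse) 0 := by
  intro n
  induction n with
  | zero => intro st _ h0; simpa using h0
  | succ n ih =>
    intro st h h0
    have hrev : (List.range (n + 1)).reverse = n :: (List.range n).reverse := by
      rw [List.range_succ, List.reverse_append]; rfl
    rw [hrev, List.foldl_cons]
    exact ih (f st n) (fun st k hk => h st k (hk.trans (Nat.lt_succ_self n)))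
      (h st n (Nat.lt_succ_self n) h0)

lemma foldl_range_congr {α : Type} (f g : α → Nat → α) (n : Nat)
    (h : ∀ st k, k < n → f st k = g st k) :
    ∀ st, List.foldl f st (List.range n) = List.foldl g st (List.range n) := by
  induction n with
  | zero => intro st; rfl
  | succ n ih =>
    intro st
    rw [List.range_succ, List.foldl_append, List.foldl_append]
    rw [ih (fun st k hk => h st k (hk.trans (Nat.lt_succ_self n)))]
    simp only [List.foldl_cons, List.foldl_nil]
    exact h _ n (Nat.lt_succ_self n)

-- shape of a rows × cols table, and how g2/s2 interact
def Sh (t : List (List Int)) (rows cols : Nat) : Prop :=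
  t.length = rows ∧ ∀ a, a < rows → (t.getD a []).length = cols

lemma getD_set (l : List (List Int)) (i : Nat) (x : List Int) (a : Nat) :
    (l.set i x).getD a [] = if a = i ∧ i < l.length then x else l.getD a [] := by
  simp only [List.getD, List.getElem?_set]
  split_ifs <;> simp_all

lemma getD_set' (l : List Int) (j : Nat) (v : Int) (b : Nat) :
    (l.set j v).getD b 0 = if b = j ∧ j < l.length then v else l.getD b 0 := by
  simp only [List.getD, List.getElem?_set]
  split_ifs <;> simp_all

lemma g2_s2 (t : List (List Int)) (i j : Nat) (v : Int) (a b : Nat) :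
    g2 (s2 t i j v) a b =
      if a = i ∧ b = j ∧ i < t.length ∧ j < (t.getD i []).length then v
      else g2 t a b := by
  simp only [g2, s2, getD_set]
  by_cases h1 : a = i ∧ i < t.length
  · obtain ⟨rfl, hlen⟩ := h1
    rw [if_pos ⟨rfl, hlen⟩, getD_set']
    by_cases h2 : b = j ∧ j < (t.getD a []).length
    · rw [if_pos h2, if_pos ⟨rfl, h2.1, hlen, h2.2⟩]
    · rw [if_neg h2, if_neg (by tauto)]
  · rw [if_neg h1, if_neg (by tauto)]

lemma sh_mk0 (rows cols : Nat) : Sh (mk0 rows cols) rows cols := by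
  constructor
  · simp [mk0]
  · intro a ha
    simp [mk0, List.getD, ha]

lemma g2_mk0 (rows cols a b : Nat) : g2 (mk0 rows cols) a b = 0 := by
  simp only [g2, mk0, List.getD, List.getElem?_replicate]
  split_ifs <;> simp

lemma sh_s2 (t : List (List Int)) (rows cols i j : Nat) (v : Int)
    (h : Sh t rows cols) : Sh (s2 t i j v) rows cols := by
  obtain ⟨hl, hr⟩ := h
  constructor
  · simp [s2, hl]
  · intro a ha
    rw [s2, getD_set]
    split_ifs with h1
    · rw [List.length_set, ← h1.1]; exact hr a ha
    · exact hr a ha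

-- joint invariant for phase 1 (row-major ascending): cells strictly before position
-- (i, c) hold the arm values, the rest still hold 0
def Inv1 (matrix : List (List Int)) (rows cols : Nat)
    (st : List (List Int) × List (List Int)) (i c : Nat) : Prop :=
  Sh st.1 rows cols ∧ Sh st.2 rows cols ∧
  ∀ a, a < rows → ∀ b, b < cols →
    (g2 st.1 a b = if a < i ∨ (a = i ∧ b < c) then armUL matrix a b else 0) ∧
    (g2 st.2 a b = if a < i ∨ (a = i ∧ b < c) then armUR matrix cols a b else 0)

lemma inv1_step (matrix : List (List Int)) (rows cols : Nat)
    (st : List (List Int) × List (List Int)) (i c : Nat)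
    (hi : i < rows) (hc : c < cols) (h : Inv1 matrix rows cols st i c) :
    Inv1 matrix rows cols (p1step matrix cols i st c) i (c + 1) := by
  obtain ⟨h1, h2, h3⟩ := h
  by_cases hm : g2 matrix i c = 1
  · rw [show p1step matrix cols i st c =
        (s2 st.1 i c (if 0 < i ∧ 0 < c then g2 st.1 (i - 1) (c - 1) + 1 else 1),
         s2 st.2 i c (if 0 < i ∧ c < cols - 1 then g2 st.2 (i - 1) (c + 1) + 1 else 1))
      from by simp [p1step, hm]]
    refine ⟨sh_s2 _ _ _ _ _ _ h1, sh_s2 _ _ _ _ _ _ h2, ?_⟩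
    intro a ha b hb
    constructor
    · rw [g2_s2]
      by_cases hab : a = i ∧ b = c
      · obtain ⟨rfl, rfl⟩ := hab
        rw [if_pos ⟨rfl, rfl, by rw [h1.1]; omega, by rw [h1.2 a hi]; omega⟩,
            if_pos (show a < a ∨ (a = a ∧ b < b + 1) by omega), armUL, if_pos hm]
        split_ifs with hg
        · rw [(h3 (a - 1) (by omega) (b - 1) (by omega)).1, if_pos (by omega)]
        · rfl
      · rw [if_neg (by tauto), (h3 a ha b hb).1]
        by_cases hold : a < i ∨ (a = i ∧ b < c)
        · rw [if_pos hold, if_pos (by omega)]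
        · rw [if_neg hold, if_neg (by omega)]
    · rw [g2_s2]
      by_cases hab : a = i ∧ b = c
      · obtain ⟨rfl, rfl⟩ := hab
        rw [if_pos ⟨rfl, rfl, by rw [h2.1]; omega, by rw [h2.2 a hi]; omega⟩,
            if_pos (show a < a ∨ (a = a ∧ b < b + 1) by omega), armUR, if_pos hm]
        by_cases hg : 0 < a ∧ b + 1 < cols
        · rw [if_pos (show 0 < a ∧ b < cols - 1 by omega), dif_pos hg,
              (h3 (a - 1) (by omega) (b + 1) (by omega)).2, if_pos (by omega)]
        · rw [if_neg (show ¬(0 < a ∧ b < cols - 1) by omega), dif_neg hg]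
      · rw [if_neg (by tauto), (h3 a ha b hb).2]
        by_cases hold : a < i ∨ (a = i ∧ b < c)
        · rw [if_pos hold, if_pos (by omega)]
        · rw [if_neg hold, if_neg (by omega)]
  · rw [show p1step matrix cols i st c = st from by simp [p1step, hm]]
    refine ⟨h1, h2, ?_⟩
    intro a ha b hb
    constructor
    · rw [(h3 a ha b hb).1]
      by_cases hold : a < i ∨ (a = i ∧ b < c)
      · rw [if_pos hold, if_pos (by omega)]
      · rw [if_neg hold]
        by_cases hnew : a < i ∨ (a = i ∧ b < c + 1)
        · rw [if_pos hnew]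
          have hab : a = i ∧ b = c := by omega
          obtain ⟨rfl, rfl⟩ := hab
          rw [armUL, if_neg hm]
        · rw [if_neg hnew]
    · rw [(h3 a ha b hb).2]
      by_cases hold : a < i ∨ (a = i ∧ b < c)
      · rw [if_pos hold, if_pos (by omega)]
      · rw [if_neg hold]
        by_cases hnew : a < i ∨ (a = i ∧ b < c + 1)
        · rw [if_pos hnew]
          have hab : a = i ∧ b = c := by omega
          obtain ⟨rfl, rfl⟩ := hab
          rw [armUR, if_neg hm]
        · rw [if_neg hnew]

lemma inv1_row (matrix : List (List Int)) (rows cols : Nat)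
    (st : List (List Int) × List (List Int)) (i : Nat)
    (hi : i < rows) (h : Inv1 matrix rows cols st i 0) :
    Inv1 matrix rows cols (p1row matrix cols st i) (i + 1) 0 := by
  have hend : Inv1 matrix rows cols (p1row matrix cols st i) i cols :=
    foldl_range_inv (p1step matrix cols i) (Inv1 matrix rows cols · i ·) cols st
      (fun st k hk => inv1_step matrix rows cols st i k hi hk) h
  obtain ⟨h1, h2, h3⟩ := hend
  refine ⟨h1, h2, ?_⟩
  intro a ha b hb
  have hab := h3 a ha b hb
  constructor
  · rw [hab.1]
    by_cases hold : a < i ∨ (a = i ∧ b < cols)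
    · rw [if_pos hold, if_pos (by omega)]
    · rw [if_neg hold, if_neg (by omega)]
  · rw [hab.2]
    by_cases hold : a < i ∨ (a = i ∧ b < cols)
    · rw [if_pos hold, if_pos (by omega)]
    · rw [if_neg hold, if_neg (by omega)]

lemma phase1_spec (matrix : List (List Int)) (rows cols : Nat) (a b : Nat)
    (ha : a < rows) (hb : b < cols) :
    g2 ((List.range rows).foldl (p1row matrix cols) (mk0 rows cols, mk0 rows cols)).1 a b
        = armUL matrix a b ∧
    g2 ((List.range rows).foldl (p1row matrix cols) (mk0 rows cols, mk0 rows cols)).2 a b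
        = armUR matrix cols a b := by
  have hfin : Inv1 matrix rows cols
      ((List.range rows).foldl (p1row matrix cols) (mk0 rows cols, mk0 rows cols)) rows 0 :=
    foldl_range_inv (p1row matrix cols) (Inv1 matrix rows cols · · 0) rows _
      (fun st k hk => inv1_row matrix rows cols st k hk)
      ⟨sh_mk0 rows cols, sh_mk0 rows cols,
        fun a _ b _ => by
          simp only [g2_mk0]
          constructor <;> rw [if_neg (by omega)]⟩
  have hab := hfin.2.2 a ha b hb
  rwa [if_pos (by omega), if_pos (by omega)] at hab

-- joint invariant for phase 2 (row-major descending): cells at or after position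
-- (i, c) (row > i, or row = i and col ≥ c) hold the arm values
def Inv2 (matrix : List (List Int)) (rows cols : Nat)
    (st : List (List Int) × List (List Int)) (i c : Nat) : Prop :=
  Sh st.1 rows cols ∧ Sh st.2 rows cols ∧
  ∀ a, a < rows → ∀ b, b < cols →
    (g2 st.1 a b = if i < a ∨ (a = i ∧ c ≤ b) then armDL matrix rows a b else 0) ∧
    (g2 st.2 a b = if i < a ∨ (a = i ∧ c ≤ b) then armDR matrix rows cols a b else 0)

lemma inv2_step (matrix : List (List Int)) (rows cols : Nat)
    (st : List (List Int) × List (List Int)) (i c : Nat)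
    (hi : i < rows) (hc : c < cols) (h : Inv2 matrix rows cols st i (c + 1)) :
    Inv2 matrix rows cols (p2step matrix rows cols i st c) i c := by
  obtain ⟨h1, h2, h3⟩ := h
  by_cases hm : g2 matrix i c = 1
  · rw [show p2step matrix rows cols i st c =
        (s2 st.1 i c (if i < rows - 1 ∧ 0 < c then g2 st.1 (i + 1) (c - 1) + 1 else 1),
         s2 st.2 i c (if i < rows - 1 ∧ c < cols - 1 then g2 st.2 (i + 1) (c + 1) + 1 else 1))
      from by simp [p2step, hm]]
    refine ⟨sh_s2 _ _ _ _ _ _ h1, sh_s2 _ _ _ _ _ _ h2, ?_⟩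
    intro a ha b hb
    constructor
    · rw [g2_s2]
      by_cases hab : a = i ∧ b = c
      · obtain ⟨rfl, rfl⟩ := hab
        rw [if_pos ⟨rfl, rfl, by rw [h1.1]; omega, by rw [h1.2 a hi]; omega⟩,
            if_pos (show a < a ∨ (a = a ∧ b ≤ b) by omega), armDL, if_pos hm]
        by_cases hg : a + 1 < rows ∧ 0 < b
        · rw [if_pos (show a < rows - 1 ∧ 0 < b by omega), dif_pos hg,
              (h3 (a + 1) (by omega) (b - 1) (by omega)).1, if_pos (by omega)]
        · rw [if_neg (show ¬(a < rows - 1 ∧ 0 < b) by omega), dif_neg hg]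
      · rw [if_neg (by tauto), (h3 a ha b hb).1]
        by_cases hold : i < a ∨ (a = i ∧ c + 1 ≤ b)
        · rw [if_pos hold, if_pos (by omega)]
        · rw [if_neg hold, if_neg (by omega)]
    · rw [g2_s2]
      by_cases hab : a = i ∧ b = c
      · obtain ⟨rfl, rfl⟩ := hab
        rw [if_pos ⟨rfl, rfl, by rw [h2.1]; omega, by rw [h2.2 a hi]; omega⟩,
            if_pos (show a < a ∨ (a = a ∧ b ≤ b) by omega), armDR, if_pos hm]
        by_cases hg : a + 1 < rows ∧ b + 1 < cols
        · rw [if_pos (show a < rows - 1 ∧ b < cols - 1 by omega), dif_pos hg,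
              (h3 (a + 1) (by omega) (b + 1) (by omega)).2, if_pos (by omega)]
        · rw [if_neg (show ¬(a < rows - 1 ∧ b < cols - 1) by omega), dif_neg hg]
      · rw [if_neg (by tauto), (h3 a ha b hb).2]
        by_cases hold : i < a ∨ (a = i ∧ c + 1 ≤ b)
        · rw [if_pos hold, if_pos (by omega)]
        · rw [if_neg hold, if_neg (by omega)]
  · rw [show p2step matrix rows cols i st c = st from by simp [p2step, hm]]
    refine ⟨h1, h2, ?_⟩
    intro a ha b hb
    constructor
    · rw [(h3 a ha b hb).1]
      by_cases hold : i < a ∨ (a = i ∧ c + 1 ≤ b)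
      · rw [if_pos hold, if_pos (by omega)]
      · rw [if_neg hold]
        by_cases hnew : i < a ∨ (a = i ∧ c ≤ b)
        · rw [if_pos hnew]
          have hab : a = i ∧ b = c := by omega
          obtain ⟨rfl, rfl⟩ := hab
          rw [armDL, if_neg hm]
        · rw [if_neg hnew]
    · rw [(h3 a ha b hb).2]
      by_cases hold : i < a ∨ (a = i ∧ c + 1 ≤ b)
      · rw [if_pos hold, if_pos (by omega)]
      · rw [if_neg hold]
        by_cases hnew : i < a ∨ (a = i ∧ c ≤ b)
        · rw [if_pos hnew]
          have hab : a = i ∧ b = c := by omega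
          obtain ⟨rfl, rfl⟩ := hab
          rw [armDR, if_neg hm]
        · rw [if_neg hnew]

lemma inv2_row (matrix : List (List Int)) (rows cols : Nat)
    (st : List (List Int) × List (List Int)) (i : Nat)
    (hi : i < rows) (h : Inv2 matrix rows cols st (i + 1) 0) :
    Inv2 matrix rows cols (p2row matrix rows cols st i) i 0 := by
  have hstart : Inv2 matrix rows cols st i cols := by
    obtain ⟨h1, h2, h3⟩ := h
    refine ⟨h1, h2, ?_⟩
    intro a ha b hb
    have hab := h3 a ha b hb
    constructor
    · rw [hab.1]
      by_cases hold : i + 1 < a ∨ (a = i + 1 ∧ 0 ≤ b)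
      · rw [if_pos hold, if_pos (by omega)]
      · rw [if_neg hold, if_neg (by omega)]
    · rw [hab.2]
      by_cases hold : i + 1 < a ∨ (a = i + 1 ∧ 0 ≤ b)
      · rw [if_pos hold, if_pos (by omega)]
      · rw [if_neg hold, if_neg (by omega)]
  exact foldl_rrange_inv (p2step matrix rows cols i) (Inv2 matrix rows cols · i ·) cols st
    (fun st k hk => inv2_step matrix rows cols st i k hi hk) hstart

lemma phase2_spec (matrix : List (List Int)) (rows cols : Nat) (a b : Nat)
    (ha : a < rows) (hb : b < cols) :
    g2 (((List.range rows).reverse).foldl (p2row matrix rows cols)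
        (mk0 rows cols, mk0 rows cols)).1 a b = armDL matrix rows a b ∧
    g2 (((List.range rows).reverse).foldl (p2row matrix rows cols)
        (mk0 rows cols, mk0 rows cols)).2 a b = armDR matrix rows cols a b := by
  have hfin : Inv2 matrix rows cols
      (((List.range rows).reverse).foldl (p2row matrix rows cols)
        (mk0 rows cols, mk0 rows cols)) 0 0 :=
    foldl_rrange_inv (p2row matrix rows cols) (Inv2 matrix rows cols · · 0) rows _
      (fun st k hk => inv2_row matrix rows cols st k hk)
      ⟨sh_mk0 rows cols, sh_mk0 rows cols,
        fun a haa b _ => by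
          simp only [g2_mk0]
          constructor <;> rw [if_neg (by omega)]⟩
  have hab := hfin.2.2 a ha b hb
  rwa [if_pos (by omega), if_pos (by omega)] at hab

lemma main_eq (matrix : List (List Int)) : solution matrix = solution_alt matrix := by
  simp only [solution, solution_alt]
  congr 1
  apply foldl_range_congr
  intro st i hi
  apply foldl_range_congr
  intro st j hj
  have hp1 := phase1_spec matrix matrix.length (matrix.getD 0 []).length i j hi hj
  have hp2 := phase2_spec matrix matrix.length (matrix.getD 0 []).length i j hi hj
  simp only [selAstep, selBstep, hp1.1, hp1.2, hp2.1, hp2.2]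

-- ===== VERDICT (by name: the statement is the Claim_ definition above) =====
theorem solution_spec : Claim_equal_solution := by
  intro matrix _ _
  exact main_eq matrix
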